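-- pv_equiv track=rewrite | github.com/AndiCodesss/stream_copier | backend/app/services/interpretation/rule_engine.py | _build_grouped_number_candidates
-- ===== SOURCE A (Python) =====
-- def _build_grouped_number_candidates(groups: list[int]) -> list[int]:
--     if len(groups) < 2:
--         return []
--
--     candidates: set[int] = set()
--
--     def build(index: int, current: str) -> None:
--         if index >= len(groups):
--             try:
--                 candidates.add(int(current))
--             except ValueError:
--                 return
--             return
--
--         value = groups[index]
--         parts = {str(value)}
--         if index > 0:
--             parts.add(str(value).zfill(2))
--             parts.add(str(value).zfill(3))
--         for part in parts:
--             build(index + 1, current + part)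
--
--     build(1, str(groups[0]))
--     return sorted(candidates)
-- ===== SOURCE B (Python) =====
-- def _build_grouped_number_candidates(groups: list[int]) -> list[int]:
--     if len(groups) < 2:
--         return []
--     # per-position option table: first group plain, later groups with zero-padded variants (ordered dedup)
--     options = [[str(groups[0])]]
--     for g in groups[1:]:
--         s = str(g)
--         options.append(list(dict.fromkeys([s, s.zfill(2), s.zfill(3)])))
--     # iterative Cartesian product of the option table
--     combos = ['']
--     for opts in options:
--         combos = [c + p for c in combos for p in opts]
--     candidates = set()
--     for joined in combos:
--         try:
--             candidates.add(int(joined))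
--         except ValueError:
--             pass
--     return sorted(candidates)
-- ===== Notes on version B (the rewrite author's own statement) =====
-- stated objective: alternative
-- what changed: Replaced the nested index-recursion with an inner closure mutating a set by an explicit per-position options table (ordered dedup of the zero-padded variants) followed by an iterative Cartesian-product fold and one final pass parsing each concatenation.
import Mathlib
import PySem

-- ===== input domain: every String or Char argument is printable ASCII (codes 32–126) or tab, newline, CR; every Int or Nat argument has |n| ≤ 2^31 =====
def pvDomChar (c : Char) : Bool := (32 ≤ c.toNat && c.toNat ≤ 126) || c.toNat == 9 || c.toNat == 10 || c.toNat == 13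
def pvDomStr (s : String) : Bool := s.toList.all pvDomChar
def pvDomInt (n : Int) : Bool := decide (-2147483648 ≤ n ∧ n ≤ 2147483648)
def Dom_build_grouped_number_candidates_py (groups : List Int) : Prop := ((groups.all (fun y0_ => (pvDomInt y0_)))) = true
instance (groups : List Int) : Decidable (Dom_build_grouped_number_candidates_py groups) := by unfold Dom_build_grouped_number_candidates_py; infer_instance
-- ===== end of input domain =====

-- B replaces A's index recursion by an explicit per-position options table and an iterative
-- Cartesian-product fold (objective: alternative decomposition, same asymptotic cost).

-- ===== PORT A =====
-- parts = {str(value)}; parts.add(str(value).zfill(2)); parts.add(str(value).zfill(3))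
-- (the recursion only runs with index ≥ 1, so the `if index > 0` branch always fires)
def pvPartsA (v : Int) : PySem.Set (List Char) :=
  PySem.Set.add
    (PySem.Set.add (PySem.Set.ofList [PySem.Int.toChars v])
      (PySem.Chars.zfill (PySem.Int.toChars v) 2))
    (PySem.Chars.zfill (PySem.Int.toChars v) 3)

-- build(index, current): recursion on groups[index:], the candidates set threaded as state;
-- int(current) → PySem.Int.ofChars? (none = ValueError, then nothing is added)
def pvBuildA : List Int → List Char → PySem.Set Int → PySem.Set Int
  | [], cur, cands =>
      match PySem.Int.ofChars? cur with
      | some n => PySem.Set.add cands n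
      | none => cands
  | v :: rest, cur, cands =>
      (pvPartsA v).foldl (fun cs p => pvBuildA rest (cur ++ p) cs) cands

def build_grouped_number_candidates_py (groups : List Int) : List Int :=
  if groups.length < 2 then []
  else
    match groups with
    | [] => []
    | g0 :: rest =>
      PySem.List.sorted (pvBuildA rest (PySem.Int.toChars g0) PySem.Set.empty) (fun x => x) false

-- ===== PORT B =====
-- list(dict.fromkeys([s, s.zfill(2), s.zfill(3)])) → PySem.List.dedup
def pvPartsB (g : Int) : List (List Char) :=
  PySem.List.dedup [PySem.Int.toChars g,
    PySem.Chars.zfill (PySem.Int.toChars g) 2,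
    PySem.Chars.zfill (PySem.Int.toChars g) 3]

def build_grouped_number_candidates_py_alt (groups : List Int) : List Int :=
  if groups.length < 2 then []
  else
    match groups with
    | [] => []
    | g0 :: rest =>
      let options : List (List (List Char)) := [PySem.Int.toChars g0] :: rest.map pvPartsB
      let combos : List (List Char) :=
        options.foldl (fun cs opts => cs.flatMap (fun c => opts.map (fun p => c ++ p))) [[]]
      let cands : PySem.Set Int :=
        combos.foldl (fun s c =>
          match PySem.Int.ofChars? c with
          | some n => PySem.Set.add s n
          | none => s) PySem.Set.empty
      PySem.List.sorted cands (fun x => x) false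

-- ===== PRECONDITION & SPEC =====
def Spec_build_grouped_number_candidates_py (groups : List Int) (out : List Int) : Prop := out = build_grouped_number_candidates_py_alt groups
instance (groups : List Int) (out : List Int) : Decidable (Spec_build_grouped_number_candidates_py groups out) := by unfold Spec_build_grouped_number_candidates_py; infer_instance

-- ===== CLAIM (what is proved, stated in full; the proofs are below) =====
def Claim_equal_build_grouped_number_candidates_py : Prop := ∀ (groups : List Int), Dom_build_grouped_number_candidates_py groups → Spec_build_grouped_number_candidates_py groups (build_grouped_number_candidates_py groups)

-- ===== LEMMAS AND PROOFS =====

-- the candidate-adding step shared (after normalisation) by both ports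
def pvStep (s : PySem.Set Int) (c : List Char) : PySem.Set Int :=
  match PySem.Int.ofChars? c with
  | some n => PySem.Set.add s n
  | none => s

-- right-nested Cartesian product of an options table (first position varies slowest)
def pvProd : List (List (List Char)) → List (List Char)
  | [] => [[]]
  | o :: t => o.flatMap (fun p => (pvProd t).map (fun q => p ++ q))

lemma pvParts_eq (g : Int) : pvPartsB g = pvPartsA g := by
  simp [pvPartsA, pvPartsB, PySem.List.dedup_eq_ofList, PySem.Set.ofList_eq_foldl, List.foldl]

-- B's iterative product fold computes the right-nested product
lemma pvFoldl_prod (ol : List (List (List Char))) (cs : List (List Char)) :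
    ol.foldl (fun cs opts => cs.flatMap (fun c => opts.map (fun p => c ++ p))) cs
      = cs.flatMap (fun c => (pvProd ol).map (fun q => c ++ q)) := by
  induction ol generalizing cs with
  | nil => simp [pvProd]
  | cons o t ih =>
      simp only [List.foldl_cons, ih, pvProd]
      simp [List.flatMap_assoc, List.map_flatMap, List.flatMap_map, List.map_map,
        Function.comp_def, List.append_assoc]

-- a foldl over a flatMap is the nested foldl
lemma pvFoldl_flatMap {α β γ : Type} (l : List α) (g : α → List β) (f : γ → β → γ) (s : γ) :
    (l.flatMap g).foldl f s = l.foldl (fun s x => (g x).foldl f s) s := by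
  induction l generalizing s with
  | nil => rfl
  | cons x t ih => simp [List.flatMap_cons, List.foldl_append, ih]

-- A's recursion is the fold of pvStep over the product of the parts table
lemma pvBuildA_eq_foldl (rest : List Int) (cur : List Char) (cands : PySem.Set Int) :
    pvBuildA rest cur cands
      = (pvProd (rest.map pvPartsA)).foldl (fun cs t => pvStep cs (cur ++ t)) cands := by
  induction rest generalizing cur cands with
  | nil => simp [pvBuildA, pvProd, pvStep]
  | cons v t ih =>
      show (pvPartsA v).foldl (fun cs p => pvBuildA t (cur ++ p) cs) cands = _
      have hfun : (fun (cs : PySem.Set Int) (p : List Char) => pvBuildA t (cur ++ p) cs)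
          = fun cs p => (pvProd (t.map pvPartsA)).foldl (fun cs u => pvStep cs ((cur ++ p) ++ u)) cs := by
        funext cs p; exact ih (cur ++ p) cs
      rw [hfun]
      simp only [List.map_cons, pvProd, pvFoldl_flatMap, List.foldl_map, List.append_assoc]

theorem pvAB_eq (groups : List Int) :
    build_grouped_number_candidates_py groups = build_grouped_number_candidates_py_alt groups := by
  by_cases h : groups.length < 2
  · simp [build_grouped_number_candidates_py, build_grouped_number_candidates_py_alt, h]
  · match groups with
    | [] => simp at h
    | g0 :: rest =>
      simp only [build_grouped_number_candidates_py, build_grouped_number_candidates_py_alt,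
        if_neg h]
      congr 1
      rw [pvBuildA_eq_foldl]
      simp only [List.foldl_cons, List.flatMap_cons, List.flatMap_nil, List.map_cons,
        List.map_nil, List.nil_append, List.append_nil]
      rw [pvFoldl_prod]
      simp only [List.flatMap_cons, List.flatMap_nil, List.append_nil, List.foldl_map]
      have : rest.map pvPartsB = rest.map pvPartsA := by
        simp [pvParts_eq]
      rw [this]
      rfl

-- ===== VERDICT (by name: the statement is the Claim_ definition above) =====
theorem build_grouped_number_candidates_py_spec : Claim_equal_build_grouped_number_candidates_py := by
  intro groups _
  unfold Spec_build_grouped_number_candidates_py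
  exact pvAB_eq groups
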